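-- pv_equiv track=rewrite | github.com/seonhak/medical_device_prereview_system | scripts/validate/원재료_치수_외형/read_to_pdf_size.py | check_forbidden_words
-- ===== SOURCE A (Python) =====
-- def check_forbidden_words(data, forbidden_words):
--     """
--     데이터에서 금지 단어를 탐지.
--     :param data: 필터링된 데이터 (filtered_data 또는 cleaned_tables)
--     :param forbidden_words: 금지 단어 리스트
--     :return: 금지 단어가 포함된 행 및 단어 목록
--     """
--     problems = []
--     for row_idx, row in enumerate(data, start=1):
--         for cell in row:
--             if cell:
--                 for word in forbidden_words:
--                     if word in cell:
--                         problems.append((row_idx, word, cell))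
--     return problems
-- ===== SOURCE B (Python) =====
-- def check_forbidden_words(data, forbidden_words):
--     # Memoize the per-cell match list: repeated cell contents scan the
--     # pattern list only once; emit rows by extending with the cached hits.
--     cache = {}
--     problems = []
--     for row_idx, row in enumerate(data, start=1):
--         for cell in row:
--             if cell:
--                 hits = cache.get(cell)
--                 if hits is None:
--                     hits = [w for w in forbidden_words if w in cell]
--                     cache[cell] = hits
--                 problems.extend((row_idx, w, cell) for w in hits)
--     return problems
-- ===== Notes on version B (the rewrite author's own statement) =====
-- stated objective: alternative
-- what changed: B memoizes the list of matching forbidden words per distinct cell content in a dict, so the inner pattern scan runs once per distinct cell and results are emitted by extending with the cached hit list.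
import Mathlib
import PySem

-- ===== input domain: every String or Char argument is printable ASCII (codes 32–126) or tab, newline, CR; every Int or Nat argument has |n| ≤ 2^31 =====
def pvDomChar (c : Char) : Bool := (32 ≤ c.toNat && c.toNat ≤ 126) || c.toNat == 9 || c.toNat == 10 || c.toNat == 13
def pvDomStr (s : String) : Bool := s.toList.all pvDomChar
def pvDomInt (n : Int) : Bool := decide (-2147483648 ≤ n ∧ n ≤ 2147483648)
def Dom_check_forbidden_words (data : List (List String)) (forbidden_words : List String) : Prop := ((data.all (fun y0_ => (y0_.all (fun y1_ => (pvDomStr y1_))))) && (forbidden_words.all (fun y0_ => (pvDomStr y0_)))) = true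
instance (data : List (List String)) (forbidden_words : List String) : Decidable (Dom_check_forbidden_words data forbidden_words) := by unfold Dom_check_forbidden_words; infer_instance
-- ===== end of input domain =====

-- B memoizes per-cell hit lists in a dict; return value proved equal to A on all inputs.


-- ===== PORT A =====
def check_forbidden_words (data : List (List String)) (forbidden_words : List String) : List (Int × String × String) :=
  (data.foldl (fun (st : Int × List (Int × String × String)) row =>
      (st.1 + 1,
       row.foldl (fun acc cell =>
          if cell ≠ "" then
            forbidden_words.foldl (fun acc word =>
              if PySem.Str.isIn word cell then acc ++ [(st.1, word, cell)] else acc) acc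
          else acc) st.2)) (1, [])).2

-- ===== PORT B =====
-- B: memoizes per-cell hit lists in a dict so the pattern scan runs once per distinct cell.
def check_forbidden_words_alt (data : List (List String)) (forbidden_words : List String) : List (Int × String × String) :=
  (data.foldl (fun (st : Int × PySem.Dict String (List String) × List (Int × String × String)) row =>
      (st.1 + 1,
       row.foldl (fun (cp : PySem.Dict String (List String) × List (Int × String × String)) cell =>
          if cell ≠ "" then
            match PySem.Dict.get? cp.1 cell with
            | some hits => (cp.1, cp.2 ++ hits.map (fun w => (st.1, w, cell)))
            | none =>
              let hits := forbidden_words.filter (fun w => PySem.Str.isIn w cell)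
              (PySem.Dict.insert cp.1 cell hits, cp.2 ++ hits.map (fun w => (st.1, w, cell)))
          else cp) st.2)) (1, PySem.Dict.empty, [])).2.2

-- ===== PRECONDITION & SPEC =====
def Spec_check_forbidden_words (data : List (List String)) (forbidden_words : List String) (out : List (Int × String × String)) : Prop := out = check_forbidden_words_alt data forbidden_words
instance (data : List (List String)) (forbidden_words : List String) (out : List (Int × String × String)) : Decidable (Spec_check_forbidden_words data forbidden_words out) := by unfold Spec_check_forbidden_words; infer_instance

-- ===== CLAIM (what is proved, stated in full; the proofs are below) =====
def Claim_equal_check_forbidden_words : Prop := ∀ (data : List (List String)) (forbidden_words : List String), Dom_check_forbidden_words data forbidden_words → Spec_check_forbidden_words data forbidden_words (check_forbidden_words data forbidden_words)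

-- ===== LEMMAS AND PROOFS =====

-- helper predicate used only by the proofs: every cached hit list is the filter of forbidden_words
def GoodCache (fw : List String) (cache : PySem.Dict String (List String)) : Prop :=
  ∀ cell hits, PySem.Dict.get? cache cell = some hits →
    hits = fw.filter (fun w => PySem.Str.isIn w cell)

theorem cellA_eq (fw : List String) (i : Int) (acc : List (Int × String × String)) (cell : String) :
    (if cell ≠ "" then
        fw.foldl (fun acc word =>
          if PySem.Str.isIn word cell then acc ++ [(i, word, cell)] else acc) acc
      else acc)
    = acc ++ (if cell ≠ "" then
        (fw.filter (fun w => PySem.Str.isIn w cell)).map (fun w => (i, w, cell)) else []) := by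
  split_ifs with h
  · exact PySem.List.foldl_append_if _ _ _ _
  · simp

theorem cellB_eq (fw : List String) (i : Int)
    (cp : PySem.Dict String (List String) × List (Int × String × String)) (cell : String)
    (h : GoodCache fw cp.1) :
    (if cell ≠ "" then
        match PySem.Dict.get? cp.1 cell with
        | some hits => (cp.1, cp.2 ++ hits.map (fun w => (i, w, cell)))
        | none =>
          let hits := fw.filter (fun w => PySem.Str.isIn w cell)
          (PySem.Dict.insert cp.1 cell hits, cp.2 ++ hits.map (fun w => (i, w, cell)))
      else cp)
    = ((if cell ≠ "" then
          match PySem.Dict.get? cp.1 cell with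
          | some _ => cp.1
          | none => PySem.Dict.insert cp.1 cell (fw.filter (fun w => PySem.Str.isIn w cell))
        else cp.1),
       cp.2 ++ (if cell ≠ "" then
          (fw.filter (fun w => PySem.Str.isIn w cell)).map (fun w => (i, w, cell)) else [])) := by
  split_ifs with hc
  · cases hg : PySem.Dict.get? cp.1 cell with
    | none => simp
    | some hits => simp [h cell hits hg]
  · simp

theorem goodCache_step (fw : List String)
    (cache : PySem.Dict String (List String)) (cell : String)
    (h : GoodCache fw cache) :
    GoodCache fw (PySem.Dict.insert cache cell (fw.filter (fun w => PySem.Str.isIn w cell))) := by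
  intro c hits hg
  rw [PySem.Dict.get?_insert] at hg
  split_ifs at hg with he
  · cases hg; subst he; rfl
  · exact h c hits hg

theorem goodCache_cell (fw : List String)
    (cache : PySem.Dict String (List String)) (cell : String)
    (h : GoodCache fw cache) :
    GoodCache fw
      (if cell ≠ "" then
          match PySem.Dict.get? cache cell with
          | some _ => cache
          | none => PySem.Dict.insert cache cell (fw.filter (fun w => PySem.Str.isIn w cell))
        else cache) := by
  split_ifs with hc
  · cases hg : PySem.Dict.get? cache cell with
    | none => exact goodCache_step fw cache cell h
    | some hits => simpa [hg] using h
  · exact h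

theorem row_eq (fw : List String) (i : Int) (row : List String)
    (cache : PySem.Dict String (List String)) (probs : List (Int × String × String))
    (h : GoodCache fw cache) :
    (row.foldl (fun (cp : PySem.Dict String (List String) × List (Int × String × String)) cell =>
        if cell ≠ "" then
          match PySem.Dict.get? cp.1 cell with
          | some hits => (cp.1, cp.2 ++ hits.map (fun w => (i, w, cell)))
          | none =>
            let hits := fw.filter (fun w => PySem.Str.isIn w cell)
            (PySem.Dict.insert cp.1 cell hits, cp.2 ++ hits.map (fun w => (i, w, cell)))
        else cp) (cache, probs)).2
      = row.foldl (fun acc cell =>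
          if cell ≠ "" then
            fw.foldl (fun acc word =>
              if PySem.Str.isIn word cell then acc ++ [(i, word, cell)] else acc) acc
          else acc) probs
    ∧ GoodCache fw
      (row.foldl (fun (cp : PySem.Dict String (List String) × List (Int × String × String)) cell =>
        if cell ≠ "" then
          match PySem.Dict.get? cp.1 cell with
          | some hits => (cp.1, cp.2 ++ hits.map (fun w => (i, w, cell)))
          | none =>
            let hits := fw.filter (fun w => PySem.Str.isIn w cell)
            (PySem.Dict.insert cp.1 cell hits, cp.2 ++ hits.map (fun w => (i, w, cell)))
        else cp) (cache, probs)).1 := by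
  induction row generalizing cache probs with
  | nil => exact ⟨rfl, h⟩
  | cons cell rest ih =>
    simp only [List.foldl_cons]
    rw [cellB_eq fw i (cache, probs) cell h, cellA_eq fw i probs cell]
    exact ih _ _ (goodCache_cell fw cache cell h)

theorem main_eq (fw : List String) (data : List (List String)) (i : Int)
    (cache : PySem.Dict String (List String)) (probs : List (Int × String × String))
    (h : GoodCache fw cache) :
    (data.foldl (fun (st : Int × PySem.Dict String (List String) × List (Int × String × String)) row =>
        (st.1 + 1,
         row.foldl (fun (cp : PySem.Dict String (List String) × List (Int × String × String)) cell =>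
            if cell ≠ "" then
              match PySem.Dict.get? cp.1 cell with
              | some hits => (cp.1, cp.2 ++ hits.map (fun w => (st.1, w, cell)))
              | none =>
                let hits := fw.filter (fun w => PySem.Str.isIn w cell)
                (PySem.Dict.insert cp.1 cell hits, cp.2 ++ hits.map (fun w => (st.1, w, cell)))
            else cp) st.2)) (i, cache, probs)).2.2
      = (data.foldl (fun (st : Int × List (Int × String × String)) row =>
          (st.1 + 1,
           row.foldl (fun acc cell =>
              if cell ≠ "" then
                fw.foldl (fun acc word =>
                  if PySem.Str.isIn word cell then acc ++ [(st.1, word, cell)] else acc) acc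
              else acc) st.2)) (i, probs)).2 := by
  induction data generalizing i cache probs with
  | nil => rfl
  | cons row rest ih =>
    simp only [List.foldl_cons]
    obtain ⟨hsnd, hgood⟩ := row_eq fw i row cache probs h
    rw [← hsnd]
    exact ih (i + 1) _ _ hgood

-- ===== VERDICT (by name: the statement is the Claim_ definition above) =====
theorem check_forbidden_words_spec : Claim_equal_check_forbidden_words := by
  intro data fw _
  unfold Spec_check_forbidden_words check_forbidden_words check_forbidden_words_alt
  exact (main_eq fw data 1 PySem.Dict.empty []
    (fun c hits hg => by simp [PySem.Dict.get?_empty] at hg)).symm
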